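-- pv_equiv track=rewrite | github.com/zemmouriahmed/MonDossier | essais/scrab_kinter.py | get_special_tile_details
-- ===== SOURCE A (Python) =====
-- SPECIAL_TILES = {
--             'MD': [(1, 1), (1, 13), (2, 2), (2, 12), (3, 3), (3, 11), (4, 4),
--                       (4, 10), (7, 7), (10, 4), (10, 10), (11, 3), (11, 11),
--                       (12, 2), (12, 12), (13, 1), (13, 13)],  # Exemple de positions Mot Double
--             'MT': [(0, 0), (0, 7), (0, 14), (7, 0), (7, 14), (14, 0), (14, 7),
--                       (14, 14)],  # Mot Triple
--             'LD': [(0, 3), (0, 11), (2, 6), (2, 8), (3, 0), (3, 7), (3, 14),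
--                          (6, 2), (6, 6), (6, 8), (6, 12), (7, 3), (7, 11), (8, 2),
--                          (8, 6), (8, 8), (8, 12), (11, 0), (11, 7), (11, 14), (12, 6),
--                          (12, 8), (14, 3), (14, 11)],  # Lettre Double
--             'LT': [(1, 5), (1, 9), (5, 1), (5, 5), (5, 9), (5, 13), (9, 1),
--                          (9, 5), (9, 9), (9, 13), (13, 5), (13, 9)],  # Lettre Triple
-- }
--
-- def get_special_tile_details(x, y):
--     for special_type, positions in SPECIAL_TILES.items():
--         if (x, y) in positions:
--             if special_type == 'MD':
--                 return 'lightblue', 'MD'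
--             elif special_type == 'MT':
--                 return 'pink', 'MT'
--             elif special_type == 'LD':
--                 return 'lightgreen', 'LD'
--             elif special_type == 'LT':
--                 return 'orange', 'LT'
--     return 'white', ''
-- ===== SOURCE B (Python) =====
-- # B: exploit the board's 4-fold symmetry: fold (x, y) to the sorted pair of
-- # distances from the board centre; each premium kind is a tiny set of folded
-- # pairs, so no coordinate lists are scanned at all.
--
-- def get_special_tile_details(x, y):
--     u, v = abs(x - 7), abs(y - 7)
--     s, t = (u, v) if u >= v else (v, u)
--     if (s == t and t in (3, 4, 5, 6)) or (s, t) == (0, 0):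
--         return 'lightblue', 'MD'
--     if (s, t) in ((7, 7), (7, 0)):
--         return 'pink', 'MT'
--     if (s, t) in ((1, 1), (4, 0), (5, 1), (7, 4)):
--         return 'lightgreen', 'LD'
--     if (s, t) in ((2, 2), (6, 2)):
--         return 'orange', 'LT'
--     return 'white', ''
-- ===== Notes on version B (the rewrite author's own statement) =====
-- stated objective: alternative
-- what changed: Replaces the scan of four coordinate lists with a closed-form classification: fold (x,y) by the board's symmetry to the sorted pair of distances from the board centre and match that pair against a handful of literal pairs per premium kind, with no position lists at all.
import Mathlib
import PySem

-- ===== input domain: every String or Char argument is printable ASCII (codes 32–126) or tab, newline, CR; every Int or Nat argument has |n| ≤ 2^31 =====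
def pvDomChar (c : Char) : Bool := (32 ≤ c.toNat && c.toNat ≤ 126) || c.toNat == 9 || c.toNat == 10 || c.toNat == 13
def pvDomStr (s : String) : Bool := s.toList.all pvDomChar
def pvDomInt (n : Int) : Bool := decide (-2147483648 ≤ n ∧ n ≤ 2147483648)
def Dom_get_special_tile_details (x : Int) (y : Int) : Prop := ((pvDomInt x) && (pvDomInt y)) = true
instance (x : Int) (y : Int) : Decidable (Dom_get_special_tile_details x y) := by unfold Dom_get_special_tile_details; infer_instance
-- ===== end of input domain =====

-- B replaces the coordinate-list scan by a closed-form symmetry classification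
-- (sorted pair of distances from the centre), keeping no position lists at all.

-- ===== PORT A =====
def pvSpecialTiles : List (String × List (Int × Int)) :=
  [("MD", [(1, 1), (1, 13), (2, 2), (2, 12), (3, 3), (3, 11), (4, 4),
           (4, 10), (7, 7), (10, 4), (10, 10), (11, 3), (11, 11),
           (12, 2), (12, 12), (13, 1), (13, 13)]),
   ("MT", [(0, 0), (0, 7), (0, 14), (7, 0), (7, 14), (14, 0), (14, 7),
           (14, 14)]),
   ("LD", [(0, 3), (0, 11), (2, 6), (2, 8), (3, 0), (3, 7), (3, 14),
           (6, 2), (6, 6), (6, 8), (6, 12), (7, 3), (7, 11), (8, 2),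
           (8, 6), (8, 8), (8, 12), (11, 0), (11, 7), (11, 14), (12, 6),
           (12, 8), (14, 3), (14, 11)]),
   ("LT", [(1, 5), (1, 9), (5, 1), (5, 5), (5, 9), (5, 13), (9, 1),
           (9, 5), (9, 9), (9, 13), (13, 5), (13, 9)])]

-- the 'for special_type, positions in SPECIAL_TILES.items()' loop with early return
def pvLoopA (x y : Int) : List (String × List (Int × Int)) → String × String
  | [] => ("white", "")
  | (st, ps) :: rest =>
    if (x, y) ∈ ps then
      if st = "MD" then ("lightblue", "MD")
      else if st = "MT" then ("pink", "MT")
      else if st = "LD" then ("lightgreen", "LD")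
      else if st = "LT" then ("orange", "LT")
      else pvLoopA x y rest
    else pvLoopA x y rest

def get_special_tile_details (x : Int) (y : Int) : String × String :=
  pvLoopA x y pvSpecialTiles

-- ===== PORT B =====
def get_special_tile_details_alt (x : Int) (y : Int) : String × String :=
  let u := |x - 7|
  let v := |y - 7|
  let s := max u v
  let t := min u v
  if (s = t ∧ (t = 3 ∨ t = 4 ∨ t = 5 ∨ t = 6)) ∨ (s, t) = ((0 : Int), (0 : Int)) then
    ("lightblue", "MD")
  else if (s, t) = ((7 : Int), (7 : Int)) ∨ (s, t) = ((7 : Int), (0 : Int)) then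
    ("pink", "MT")
  else if (s, t) = ((1 : Int), (1 : Int)) ∨ (s, t) = ((4 : Int), (0 : Int)) ∨
          (s, t) = ((5 : Int), (1 : Int)) ∨ (s, t) = ((7 : Int), (4 : Int)) then
    ("lightgreen", "LD")
  else if (s, t) = ((2 : Int), (2 : Int)) ∨ (s, t) = ((6 : Int), (2 : Int)) then
    ("orange", "LT")
  else ("white", "")

-- ===== PRECONDITION & SPEC =====
def Spec_get_special_tile_details (x : Int) (y : Int) (out : String × String) : Prop := out = get_special_tile_details_alt x y
instance (x : Int) (y : Int) (out : String × String) : Decidable (Spec_get_special_tile_details x y out) := by unfold Spec_get_special_tile_details; infer_instance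

-- ===== CLAIM (what is proved, stated in full; the proofs are below) =====
def Claim_equal_get_special_tile_details : Prop := ∀ (x : Int) (y : Int), Dom_get_special_tile_details x y → Spec_get_special_tile_details x y (get_special_tile_details x y)

-- ===== LEMMAS AND PROOFS =====

-- off-board coordinates belong to no on-board list
theorem pvNotMem (x y : Int) (l : List (Int × Int))
    (hl : ∀ p ∈ l, 0 ≤ p.1 ∧ p.1 ≤ 14 ∧ 0 ≤ p.2 ∧ p.2 ≤ 14)
    (h : ¬ (0 ≤ x ∧ x ≤ 14 ∧ 0 ≤ y ∧ y ≤ 14)) : (x, y) ∉ l :=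
  fun hm => h (hl _ hm)

theorem pvOffA (x y : Int) (h : ¬ (0 ≤ x ∧ x ≤ 14 ∧ 0 ≤ y ∧ y ≤ 14)) :
    get_special_tile_details x y = ("white", "") := by
  simp only [get_special_tile_details, pvSpecialTiles, pvLoopA]
  rw [if_neg (pvNotMem x y _ (by decide) h), if_neg (pvNotMem x y _ (by decide) h),
      if_neg (pvNotMem x y _ (by decide) h), if_neg (pvNotMem x y _ (by decide) h)]

theorem pvOffB (x y : Int) (h : ¬ (0 ≤ x ∧ x ≤ 14 ∧ 0 ≤ y ∧ y ≤ 14)) :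
    get_special_tile_details_alt x y = ("white", "") := by
  have hs : 8 ≤ max |x - 7| |y - 7| := by
    by_cases hx : 0 ≤ x ∧ x ≤ 14
    · refine le_trans ?_ (le_max_right _ _)
      rw [le_abs]; omega
    · refine le_trans ?_ (le_max_left _ _)
      rw [le_abs]; omega
  simp only [get_special_tile_details_alt, Prod.mk.injEq]
  split_ifs with h1 h2 h3 h4 <;> first
    | rfl
    | · exfalso
        rcases h1 with ⟨he, ht⟩ | ⟨hs0, _⟩
        · have := min_le_max (a := |x - 7|) (b := |y - 7|); omega
        · omega
    | · exfalso; rcases h2 with ⟨hs7, _⟩ | ⟨hs7, _⟩ <;> omega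
    | · exfalso; rcases h3 with ⟨hs7, _⟩ | ⟨hs7, _⟩ | ⟨hs7, _⟩ | ⟨hs7, _⟩ <;> omega
    | · exfalso; rcases h4 with ⟨hs7, _⟩ | ⟨hs7, _⟩ <;> omega

set_option maxRecDepth 10000 in
theorem pvOnBoard : ∀ a ∈ List.range 15, ∀ b ∈ List.range 15,
    get_special_tile_details (a : Int) (b : Int) = get_special_tile_details_alt (a : Int) (b : Int) := by
  decide

-- ===== VERDICT (by name: the statement is the Claim_ definition above) =====
theorem get_special_tile_details_spec : Claim_equal_get_special_tile_details := by
  intro x y _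
  unfold Spec_get_special_tile_details
  by_cases h : 0 ≤ x ∧ x ≤ 14 ∧ 0 ≤ y ∧ y ≤ 14
  · have hx : x = (x.toNat : Int) := (Int.toNat_of_nonneg h.1).symm
    have hy : y = (y.toNat : Int) := (Int.toNat_of_nonneg h.2.2.1).symm
    rw [hx, hy]
    exact pvOnBoard x.toNat (by simp only [List.mem_range]; omega)
      y.toNat (by simp only [List.mem_range]; omega)
  · rw [pvOffA x y h, pvOffB x y h]
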